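-- pv_equiv track=rewrite | github.com/maxforgan/sec-mcp | sec_financials.py | _filter_balance_values
-- ===== SOURCE A (Python) =====
-- from typing import Dict, Any, Optional
--
-- def _filter_balance_values(values: list, periods: int) -> list:
--     """
--     Filter balance sheet values (point-in-time) from 10-K and 10-Q.
--     Deduplicates by end date, keeping the most recently filed version.
--     """
--     filtered = [v for v in values if v.get('form') in ('10-K', '10-Q')]
--
--     seen: Dict[str, dict] = {}
--     for v in sorted(filtered, key=lambda x: x.get('filed', ''), reverse=True):
--         end = v.get('end', '')
--         if end not in seen:
--             seen[end] = v
--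
--     return sorted(seen.values(), key=lambda x: x.get('end', ''), reverse=True)[:periods]
-- ===== SOURCE B (Python) =====
-- def _filter_balance_values(values: list, periods: int) -> list:
--     """Two-stage dedup: first compute, per end date, the maximum 'filed' string
--     (strict '>' so ties keep the earliest occurrence), then emit, for each end
--     date in descending order, the first record carrying that maximum 'filed'.
--     No record sort and no record dict are needed."""
--     filtered = [v for v in values if v.get('form') in ('10-K', '10-Q')]
--
--     best = {}
--     for v in filtered:
--         e = v.get('end', '')
--         f = v.get('filed', '')
--         if e not in best or best[e] < f:
--             best[e] = f
--
--     out = []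
--     for e in sorted(best, reverse=True):
--         for v in filtered:
--             if v.get('end', '') == e and v.get('filed', '') == best[e]:
--                 out.append(v)
--                 break
--     return out[:periods]
-- ===== Notes on version B (the rewrite author's own statement) =====
-- stated objective: alternative
-- what changed: Replaced the record sort and record dict (sort by 'filed' desc, first-seen per end, sort values by end) with a two-stage scheme: a dict of plain strings mapping each end date to its maximum 'filed' (strict '<' keeps the earliest occurrence on ties), then for each end key in descending order a scan picking the first record with that end and that maximum 'filed'.
import Mathlib
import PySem

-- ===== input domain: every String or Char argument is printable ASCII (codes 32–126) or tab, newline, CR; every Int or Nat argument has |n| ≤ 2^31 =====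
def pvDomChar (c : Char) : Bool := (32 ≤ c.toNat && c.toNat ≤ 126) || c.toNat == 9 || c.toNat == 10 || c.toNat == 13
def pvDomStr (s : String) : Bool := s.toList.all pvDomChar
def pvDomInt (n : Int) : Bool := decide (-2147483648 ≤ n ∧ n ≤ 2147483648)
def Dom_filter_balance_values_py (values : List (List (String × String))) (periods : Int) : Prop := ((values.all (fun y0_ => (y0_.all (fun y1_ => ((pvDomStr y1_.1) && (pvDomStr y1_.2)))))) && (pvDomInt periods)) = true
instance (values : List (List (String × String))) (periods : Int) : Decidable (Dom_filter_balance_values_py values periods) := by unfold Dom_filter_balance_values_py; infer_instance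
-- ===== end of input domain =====

-- B replaces A's record sort + record dict with a two-stage scheme: a dict mapping each end
-- date to its maximum 'filed' string, then a pick of the first matching record per end date
-- in descending key order; objective: alternative.

-- ===== PORT A =====
-- v.get(k) / v.get(k, dflt) on a Python dict (ported as its association list)
def pvGet (v : List (String × String)) (k : String) : Option String := (PySem.Dict.mk v).get? k
def pvGetD (v : List (String × String)) (k dflt : String) : String := (PySem.Dict.mk v).getD k dflt
-- v.get('form') in ('10-K', '10-Q')
def pvFormOk (v : List (String × String)) : Bool :=
  pvGet v "form" == some "10-K" || pvGet v "form" == some "10-Q"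

def filter_balance_values_py (values : List (List (String × String))) (periods : Int) : List (List (String × String)) :=
  let filtered := values.filter pvFormOk
  let seen := (PySem.List.sorted filtered (fun x => pvGetD x "filed" "") true).foldl
    (fun (d : PySem.Dict String (List (String × String))) v =>
      if d.contains (pvGetD v "end" "") then d else d.insert (pvGetD v "end" "") v)
    PySem.Dict.empty
  PySem.List.slice (PySem.List.sorted seen.values (fun x => pvGetD x "end" "") true) none (some periods)

-- ===== PORT B =====
def filter_balance_values_py_alt (values : List (List (String × String))) (periods : Int) : List (List (String × String)) :=
  let filtered := values.filter pvFormOk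
  -- best : end date -> maximum 'filed' string (strict '<' keeps first occurrence on ties)
  let best := filtered.foldl
    (fun (b : PySem.Dict String String) v =>
      if !b.contains (pvGetD v "end" "") || b.getD (pvGetD v "end" "") "" < pvGetD v "filed" ""
      then b.insert (pvGetD v "end" "") (pvGetD v "filed" "")
      else b)
    PySem.Dict.empty
  -- for e in sorted(best, reverse=True): append the first record with this end and this filed
  let out := (PySem.List.sorted best.keys (fun k => k) true).foldl
    (fun (out : List (List (String × String))) e =>
      out ++ (filtered.find? (fun v => pvGetD v "end" "" == e && pvGetD v "filed" "" == best.getD e "")).toList)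
    []
  PySem.List.slice out none (some periods)

-- ===== PRECONDITION & SPEC =====
def Spec_filter_balance_values_py (values : List (List (String × String))) (periods : Int) (out : List (List (String × String))) : Prop := out = filter_balance_values_py_alt values periods
instance (values : List (List (String × String))) (periods : Int) (out : List (List (String × String))) : Decidable (Spec_filter_balance_values_py values periods out) := by unfold Spec_filter_balance_values_py; infer_instance

-- ===== CLAIM (what is proved, stated in full; the proofs are below) =====
def Claim_equal_filter_balance_values_py : Prop := ∀ (values : List (List (String × String))) (periods : Int), Dom_filter_balance_values_py values periods → Spec_filter_balance_values_py values periods (filter_balance_values_py values periods)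

-- ===== LEMMAS AND PROOFS =====

-- "keep the better of the stored value and the new one" step of A's dedup, as a fold step
def bstep {α : Type} (f : α → String) (o : Option α) (v : α) : Option α :=
  match o with
  | none => some v
  | some w => if f w < f v then some v else some w

-- "running maximum key" step of B's first pass
def mstep {α : Type} (f : α → String) (o : Option String) (v : α) : Option String :=
  match o with
  | none => some (f v)
  | some m => if m < f v then some (f v) else some m

lemma find?_insertBy {α : Type} (f : α → String) (p : α → Bool) (x : α) (s : List α)
    (hs : s.Pairwise (fun a b => f b ≤ f a)) :
    (PySem.List.insertBy (fun a b => decide (f b < f a)) x s).find? p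
      = if p x then bstep f (s.find? p) x else s.find? p := by
  induction s with
  | nil => by_cases hp : p x <;> simp [PySem.List.insertBy, List.find?, hp, bstep]
  | cons y ys ih =>
    rcases List.pairwise_cons.mp hs with ⟨hy, hys⟩
    by_cases hxy : f y < f x
    · simp only [PySem.List.insertBy, hxy, decide_true, if_true]
      by_cases hp : p x
      · rw [if_pos hp, List.find?_cons_of_pos hp]
        cases hfy : (y :: ys).find? p with
        | none => simp [bstep]
        | some w =>
          have hw : f w < f x := by
            have hmem := List.mem_of_find?_eq_some hfy
            rcases List.mem_cons.mp hmem with h | h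
            · exact h ▸ hxy
            · exact lt_of_le_of_lt (hy w h) hxy
          simp [bstep, hw]
      · rw [if_neg hp, List.find?_cons_of_neg hp]
    · simp only [PySem.List.insertBy, hxy, decide_false, Bool.false_eq_true, if_false]
      by_cases hpy : p y
      · rw [List.find?_cons_of_pos hpy, List.find?_cons_of_pos hpy]
        by_cases hp : p x
        · rw [if_pos hp]; simp [bstep, hxy]
        · rw [if_neg hp]
      · rw [List.find?_cons_of_neg hpy, List.find?_cons_of_neg hpy]
        exact ih hys

lemma find?_sorted_rev {α : Type} (f : α → String) (p : α → Bool) (l : List α) :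
    (PySem.List.sorted l f true).find? p = (l.filter p).foldl (bstep f) none := by
  induction l using List.reverseRecOn with
  | nil => simp [PySem.List.sorted]
  | append_singleton l x ih =>
    rw [PySem.List.sorted_rev_eq_foldl_insertBy, List.foldl_append,
        ← PySem.List.sorted_rev_eq_foldl_insertBy]
    simp only [List.foldl_cons, List.foldl_nil]
    rw [find?_insertBy f p x _ (PySem.List.sorted_pairwise_rev l f), ih,
        List.filter_append]
    by_cases hp : p x
    · simp [hp]
    · simp [hp]

lemma loopA_get? {α : Type} (e : α → String) (s : List α) (d : PySem.Dict String α) (k : String) :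
    (s.foldl (fun d v => if d.contains (e v) then d else d.insert (e v) v) d).get? k
      = match d.get? k with
        | some w => some w
        | none => s.find? (fun v => e v == k) := by
  induction s generalizing d with
  | nil => cases h : d.get? k <;> simp [h]
  | cons v s ih =>
    simp only [List.foldl_cons]
    by_cases hc : d.contains (e v)
    · rw [if_pos hc, ih]
      cases h : d.get? k with
      | some w => rfl
      | none =>
        have hk : e v ≠ k := by
          intro hek
          rw [PySem.Dict.contains_eq_isSome_get?, hek, h] at hc
          simp at hc
        simp [hk]
    · rw [if_neg hc, ih]
      by_cases hek : e v = k
      · have h : d.get? k = none := by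
          rw [PySem.Dict.contains_eq_isSome_get?, hek] at hc
          cases h' : d.get? k <;> simp [h'] at hc ⊢
        rw [PySem.Dict.get?_insert]
        simp [h, hek]
      · rw [PySem.Dict.get?_insert, if_neg (by exact fun hk => hek hk.symm)]
        cases h : d.get? k with
        | some w => rfl
        | none => simp [hek]

lemma loopA_nodup {α : Type} (e : α → String) (s : List α) (d : PySem.Dict String α)
    (hd : d.keys.Nodup) :
    (s.foldl (fun d v => if d.contains (e v) then d else d.insert (e v) v) d).keys.Nodup := by
  induction s generalizing d with
  | nil => exact hd
  | cons v s ih =>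
    simp only [List.foldl_cons]
    by_cases hc : d.contains (e v)
    · rw [if_pos hc]; exact ih d hd
    · rw [if_neg hc]; exact ih _ (PySem.Dict.nodup_keys_insert d _ v hd)

lemma bstep_mem {α : Type} (f : α → String) (l : List α) (o : Option α) (v : α)
    (h : l.foldl (bstep f) o = some v) : v ∈ l ∨ o = some v := by
  induction l generalizing o with
  | nil => exact Or.inr h
  | cons x l ih =>
    rw [List.foldl_cons] at h
    rcases ih _ h with hm | ho
    · exact Or.inl (List.mem_cons_of_mem _ hm)
    · cases o with
      | none =>
        simp [bstep] at ho
        exact Or.inl (ho ▸ List.mem_cons_self)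
      | some w =>
        by_cases hf : f w < f x
        · simp [bstep, hf] at ho
          exact Or.inl (ho ▸ List.mem_cons_self)
        · simp [bstep, hf] at ho
          exact Or.inr (congrArg some ho)

lemma bstep_none_iff {α : Type} (f : α → String) (l : List α) :
    l.foldl (bstep f) none = none ↔ l = [] := by
  induction l using List.reverseRecOn with
  | nil => simp
  | append_singleton l x ih =>
    rw [List.foldl_append]
    constructor
    · intro h
      cases hprev : l.foldl (bstep f) none with
      | none => rw [hprev] at h; simp [bstep] at h
      | some w =>
        rw [hprev] at h
        by_cases hf : f w < f x <;> simp [bstep, hf] at h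
    · intro h; simp at h

lemma mstep_none_iff {α : Type} (f : α → String) (l : List α) :
    l.foldl (mstep f) none = none ↔ l = [] := by
  induction l using List.reverseRecOn with
  | nil => simp
  | append_singleton l x ih =>
    rw [List.foldl_append]
    constructor
    · intro h
      cases hprev : l.foldl (mstep f) none with
      | none => rw [hprev] at h; simp [mstep] at h
      | some m =>
        rw [hprev] at h
        by_cases hf : m < f x <;> simp [mstep, hf] at h
    · intro h; simp at h

lemma mstep_spec {α : Type} (f : α → String) (l : List α) (m : String)
    (h : l.foldl (mstep f) none = some m) : (∃ v ∈ l, f v = m) ∧ ∀ v ∈ l, f v ≤ m := by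
  induction l using List.reverseRecOn generalizing m with
  | nil => simp at h
  | append_singleton l x ih =>
    rw [List.foldl_append, List.foldl_cons, List.foldl_nil] at h
    cases hprev : l.foldl (mstep f) none with
    | none =>
      have hl : l = [] := (mstep_none_iff f l).mp hprev
      rw [hprev] at h
      simp [mstep] at h
      subst hl
      refine ⟨⟨x, by simp, h⟩, ?_⟩
      intro v hv
      simp at hv
      exact hv ▸ h.le
    | some m' =>
      rw [hprev] at h
      rcases ih m' hprev with ⟨⟨w, hwmem, hwf⟩, hbound⟩
      by_cases hf : m' < f x
      · simp [mstep, hf] at h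
        refine ⟨⟨x, by simp, h⟩, ?_⟩
        intro v hv
        rcases List.mem_append.mp hv with hv | hv
        · rw [← h]; exact le_of_lt (lt_of_le_of_lt (hbound v hv) hf)
        · simp at hv; subst hv; exact h.le
      · simp [mstep, hf] at h
        refine ⟨⟨w, List.mem_append_left _ hwmem, h ▸ hwf⟩, ?_⟩
        intro v hv
        rcases List.mem_append.mp hv with hv | hv
        · rw [← h]; exact hbound v hv
        · simp at hv; subst hv; rw [← h]; exact le_of_not_gt hf

-- A's "first seen after sorting by f desc" equals "first element attaining the maximum f"
lemma bstep_eq_find {α : Type} (f : α → String) (l : List α) (m : String)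
    (h : l.foldl (mstep f) none = some m) :
    l.foldl (bstep f) none = l.find? (fun v => f v == m) := by
  induction l using List.reverseRecOn generalizing m with
  | nil => simp at h
  | append_singleton l x ih =>
    rw [List.foldl_append, List.foldl_cons, List.foldl_nil] at h
    rw [List.foldl_append, List.foldl_cons, List.foldl_nil]
    cases hprev : l.foldl (mstep f) none with
    | none =>
      have hl : l = [] := (mstep_none_iff f l).mp hprev
      rw [hprev] at h
      simp [mstep] at h
      subst hl
      simp [bstep, h]
    | some m' =>
      rw [hprev] at h
      rcases mstep_spec f l m' hprev with ⟨⟨w0, hw0mem, hw0f⟩, hbound⟩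
      have hfind : l.find? (fun v => f v == m') ≠ none := by
        intro hn
        exact absurd (by simpa using List.find?_eq_none.mp hn w0 hw0mem) (by simp [hw0f])
      cases hfound : l.find? (fun v => f v == m') with
      | none => exact absurd hfound hfind
      | some w =>
        have hwf : f w = m' := by simpa using List.find?_some hfound
        have hprevb : l.foldl (bstep f) none = some w := (ih m' hprev).trans hfound
        rw [hprevb]
        by_cases hf : m' < f x
        · simp [mstep, hf] at h
          have hstep : bstep f (some w) x = some x := by simp [bstep, hwf, hf]
          rw [hstep, List.find?_append]
          have hnone : l.find? (fun v => f v == m) = none := by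
            apply List.find?_eq_none.mpr
            intro v hv
            have : f v < m := lt_of_le_of_lt (hbound v hv) (h ▸ hf)
            simp [ne_of_lt this]
          rw [hnone]
          simp [List.find?, h]
        · simp [mstep, hf] at h
          subst h
          have hstep : bstep f (some w) x = some w := by simp [bstep, hwf, hf]
          rw [hstep, List.find?_append, hfound]
          rfl

-- find? over a filter = find? with the conjoined predicate
lemma find?_filter_conj {α : Type} (p q : α → Bool) (l : List α) :
    l.find? (fun a => p a && q a) = (l.filter p).find? q := by
  induction l with
  | nil => rfl
  | cons v s ih =>
    by_cases hp : p v = true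
    · rw [List.filter_cons_of_pos hp]
      by_cases hq : q v = true
      · rw [List.find?_cons_of_pos (by simp [hp, hq]), List.find?_cons_of_pos hq]
      · rw [List.find?_cons_of_neg (by simp [hq]), List.find?_cons_of_neg hq, ih]
    · rw [List.filter_cons_of_neg (by simpa using hp),
          List.find?_cons_of_neg (by simp [hp]), ih]

-- B's first pass, characterised per key
lemma loopBest_get? (s : List (List (String × String))) (d : PySem.Dict String String) (k : String) :
    (s.foldl (fun b v =>
        if !b.contains (pvGetD v "end" "") || b.getD (pvGetD v "end" "") "" < pvGetD v "filed" ""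
        then b.insert (pvGetD v "end" "") (pvGetD v "filed" "") else b) d).get? k
      = (s.filter (fun v => pvGetD v "end" "" == k)).foldl (mstep (fun v => pvGetD v "filed" "")) (d.get? k) := by
  induction s generalizing d with
  | nil => simp
  | cons v s ih =>
    simp only [List.foldl_cons, List.filter_cons]
    by_cases hek : pvGetD v "end" "" = k
    · have hbeq : (pvGetD v "end" "" == k) = true := by simp [hek]
      rw [hbeq]
      simp only [if_true, List.foldl_cons]
      cases h : d.get? (pvGetD v "end" "") with
      | none =>
        have hc : d.contains (pvGetD v "end" "") = false := by
          rw [PySem.Dict.contains_eq_isSome_get?, h]; rfl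
        rw [hc]
        simp only [Bool.not_false, Bool.true_or, if_true]
        rw [ih, PySem.Dict.get?_insert]
        simp [hek, hek ▸ h, mstep]
      | some m =>
        have hc : d.contains (pvGetD v "end" "") = true := by
          rw [PySem.Dict.contains_eq_isSome_get?, h]; rfl
        have hgd : d.getD (pvGetD v "end" "") "" = m := by
          rw [PySem.Dict.getD_eq_get?_getD, h]; rfl
        rw [hc, hgd]
        by_cases hf : m < pvGetD v "filed" ""
        · simp only [Bool.not_true, Bool.false_or, hf, decide_true, if_true]
          rw [ih, PySem.Dict.get?_insert]
          simp [hek, hek ▸ h, mstep, hf]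
        · simp only [Bool.not_true, Bool.false_or, hf, decide_false, Bool.false_eq_true, if_false]
          rw [ih]
          simp [hek ▸ h, mstep, hf]
    · have hbeq : (pvGetD v "end" "" == k) = false := by simp [hek]
      rw [hbeq]
      simp only [Bool.false_eq_true, if_false]
      by_cases hc : (!d.contains (pvGetD v "end" "") || d.getD (pvGetD v "end" "") "" < pvGetD v "filed" "") = true
      · rw [if_pos hc, ih, PySem.Dict.get?_insert, if_neg (fun hk => hek hk.symm)]
      · rw [if_neg hc, ih]

lemma loopBest_nodup (s : List (List (String × String))) (d : PySem.Dict String String)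
    (hd : d.keys.Nodup) :
    (s.foldl (fun b v =>
        if !b.contains (pvGetD v "end" "") || b.getD (pvGetD v "end" "") "" < pvGetD v "filed" ""
        then b.insert (pvGetD v "end" "") (pvGetD v "filed" "") else b) d).keys.Nodup := by
  induction s generalizing d with
  | nil => exact hd
  | cons v s ih =>
    simp only [List.foldl_cons]
    by_cases hc : (!d.contains (pvGetD v "end" "") || d.getD (pvGetD v "end" "") "" < pvGetD v "filed" "") = true
    · rw [if_pos hc]; exact ih _ (PySem.Dict.nodup_keys_insert d _ _ hd)
    · rw [if_neg hc]; exact ih d hd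

-- the two dictionaries of the proofs, named
def seenA (values : List (List (String × String))) : PySem.Dict String (List (String × String)) :=
  (PySem.List.sorted (values.filter pvFormOk) (fun x => pvGetD x "filed" "") true).foldl
    (fun d v => if d.contains (pvGetD v "end" "") then d else d.insert (pvGetD v "end" "") v)
    PySem.Dict.empty

def bestB (values : List (List (String × String))) : PySem.Dict String String :=
  (values.filter pvFormOk).foldl
    (fun b v =>
      if !b.contains (pvGetD v "end" "") || b.getD (pvGetD v "end" "") "" < pvGetD v "filed" ""
      then b.insert (pvGetD v "end" "") (pvGetD v "filed" "")
      else b)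
    PySem.Dict.empty

lemma seenA_char (values : List (List (String × String))) (k : String) :
    (seenA values).get? k
      = ((values.filter pvFormOk).filter (fun v => pvGetD v "end" "" == k)).foldl
          (bstep (fun v => pvGetD v "filed" "")) none := by
  unfold seenA
  rw [loopA_get? (fun v => pvGetD v "end" "")]
  rw [PySem.Dict.get?_empty]
  exact find?_sorted_rev _ _ _

lemma bestB_char (values : List (List (String × String))) (k : String) :
    (bestB values).get? k
      = ((values.filter pvFormOk).filter (fun v => pvGetD v "end" "" == k)).foldl
          (mstep (fun v => pvGetD v "filed" "")) none := by
  unfold bestB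
  rw [loopBest_get?, PySem.Dict.get?_empty]

-- membership in the two key sets coincides
lemma keys_mem_iff (values : List (List (String × String))) (k : String) :
    k ∈ (seenA values).keys ↔ k ∈ (bestB values).keys := by
  rw [← not_iff_not, ← PySem.Dict.get?_eq_none_iff_not_mem_keys,
      ← PySem.Dict.get?_eq_none_iff_not_mem_keys, seenA_char, bestB_char,
      bstep_none_iff, mstep_none_iff]

-- for a key of bestB, the find? in B's second pass returns exactly A's stored record
lemma pick_eq (values : List (List (String × String))) (e : String)
    (hmem : e ∈ (bestB values).keys) :
    (values.filter pvFormOk).find?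
        (fun v => pvGetD v "end" "" == e && pvGetD v "filed" "" == (bestB values).getD e "")
      = (seenA values).get? e := by
  cases hb : (bestB values).get? e with
  | none =>
    exact absurd ((PySem.Dict.get?_eq_none_iff_not_mem_keys _ _).mp hb) (by simpa using hmem)
  | some m =>
    have hgd : (bestB values).getD e "" = m := by
      rw [PySem.Dict.getD_eq_get?_getD, hb]; rfl
    rw [hgd, seenA_char]
    have hm : ((values.filter pvFormOk).filter (fun v => pvGetD v "end" "" == e)).foldl
        (mstep (fun v => pvGetD v "filed" "")) none = some m := (bestB_char values e).symm.trans hb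
    rw [bstep_eq_find _ _ m hm, find?_filter_conj]

-- folding "append the found record" over a list of keys on which find? always succeeds = map
lemma foldl_append_pick {κ α : Type} (F : κ → Option α) (g : κ → α) (sk : List κ)
    (h : ∀ e ∈ sk, F e = some (g e)) (acc : List α) :
    sk.foldl (fun out e => out ++ (F e).toList) acc = acc ++ sk.map g := by
  induction sk generalizing acc with
  | nil => simp
  | cons e sk ih =>
    rw [List.foldl_cons, h e List.mem_cons_self, List.map_cons, ih (fun x hx => h x (List.mem_cons_of_mem _ hx)) _]
    simp

-- every record stored by A carries its key as 'end'
lemma seenA_end_key (values : List (List (String × String))) (k : String)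
    (hkmem : k ∈ (seenA values).keys) : pvGetD ((seenA values).getD k []) "end" "" = k := by
  cases h : (seenA values).get? k with
  | none => exact absurd ((PySem.Dict.get?_eq_none_iff_not_mem_keys _ _).mp h) (by simpa using hkmem)
  | some v =>
    have hfold := (seenA_char values k).symm.trans h
    rcases bstep_mem _ _ _ _ hfold with hm | ho
    · have := (List.mem_filter.mp hm).2
      have hgd : (seenA values).getD k [] = v := by
        rw [PySem.Dict.getD_eq_get?_getD, h]; rfl
      rw [hgd]
      simpa using this
    · exact absurd ho (by simp)

-- main list identity: A's sorted dedup list = B's picked list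
lemma main_eq (values : List (List (String × String))) :
    PySem.List.sorted (seenA values).values (fun x => pvGetD x "end" "") true
      = (PySem.List.sorted (bestB values).keys (fun k => k) true).map
          (fun e => (seenA values).getD e []) := by
  have hnA : (seenA values).keys.Nodup := loopA_nodup _ _ _ PySem.Dict.nodup_keys_empty
  have hnB : (bestB values).keys.Nodup := loopBest_nodup _ _ PySem.Dict.nodup_keys_empty
  set sk := PySem.List.sorted (bestB values).keys (fun k => k) true with hsk
  have hskperm : sk.Perm (bestB values).keys := PySem.List.sorted_perm _ _ _
  have hpermk : (bestB values).keys.Perm (seenA values).keys :=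
    (List.perm_ext_iff_of_nodup hnB hnA).mpr (fun k => (keys_mem_iff values k).symm)
  have hskmem : ∀ e ∈ sk, e ∈ (seenA values).keys := by
    intro e he
    exact hpermk.mem_iff.mp (hskperm.mem_iff.mp he)
  -- the mapped list is a permutation of seenA.values
  have hvals := PySem.Dict.values_eq_map_keys (seenA values) hnA []
  have hperm : (sk.map (fun e => (seenA values).getD e [])).Perm (seenA values).values := by
    rw [hvals]
    exact (hskperm.trans hpermk).map _
  -- the mapped list is strictly decreasing in the 'end' key
  have hsknodup : sk.Nodup := hskperm.nodup_iff.mpr hnB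
  have hskpw : sk.Pairwise (fun a b => b ≤ a) := PySem.List.sorted_pairwise_rev _ _
  have hskstrict : sk.Pairwise (fun a b => b < a) :=
    ((hskpw.and hsknodup).imp (fun h => lt_of_le_of_ne h.1 (Ne.symm h.2)))
  have hpair : (sk.map (fun e => (seenA values).getD e [])).Pairwise
      (fun a b => pvGetD b "end" "" < pvGetD a "end" "") := by
    rw [List.pairwise_map]
    refine List.Pairwise.imp_of_mem ?_ hskstrict
    intro a b ha hb hlt
    rw [seenA_end_key values a (hskmem a ha), seenA_end_key values b (hskmem b hb)]
    exact hlt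
  exact PySem.List.sorted_rev_eq_of_perm_of_pairwise_gt _ _ _ hperm hpair

-- ===== VERDICT (by name: the statement is the Claim_ definition above) =====
theorem filter_balance_values_py_spec : Claim_equal_filter_balance_values_py := by
  intro values periods _
  unfold Spec_filter_balance_values_py filter_balance_values_py filter_balance_values_py_alt
  show PySem.List.slice (PySem.List.sorted (seenA values).values (fun x => pvGetD x "end" "") true) none (some periods)
      = PySem.List.slice
          ((PySem.List.sorted (bestB values).keys (fun k => k) true).foldl
            (fun out e =>
              out ++ ((values.filter pvFormOk).find?
                  (fun v => pvGetD v "end" "" == e && pvGetD v "filed" "" == (bestB values).getD e "")).toList)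
            []) none (some periods)
  have hF : ∀ e ∈ PySem.List.sorted (bestB values).keys (fun k => k) true,
      (values.filter pvFormOk).find?
          (fun v => pvGetD v "end" "" == e && pvGetD v "filed" "" == (bestB values).getD e "")
        = some ((seenA values).getD e []) := by
    intro e he
    rw [pick_eq values e ((PySem.List.mem_sorted _ _ _ _).mp he)]
    rw [PySem.Dict.getD_eq_get?_getD]
    cases h : (seenA values).get? e with
    | none =>
      exact absurd ((PySem.Dict.get?_eq_none_iff_not_mem_keys _ _).mp h)
        (by simpa using (keys_mem_iff values e).mpr ((PySem.List.mem_sorted _ _ _ _).mp he))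
    | some v => rfl
  have h1 := foldl_append_pick
    (fun e => (values.filter pvFormOk).find?
      (fun v => pvGetD v "end" "" == e && pvGetD v "filed" "" == (bestB values).getD e ""))
    (fun e => (seenA values).getD e [])
    (PySem.List.sorted (bestB values).keys (fun k => k) true) hF []
  rw [List.nil_append] at h1
  rw [main_eq]
  exact congrArg (fun l => PySem.List.slice l none (some periods)) h1.symm
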